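-- pv_equiv track=rewrite | github.com/aerijman/TADs-analysis | summary_utils.py | find_disorder_regions
-- ===== SOURCE A (Python) =====
-- def find_disorder_regions(dis, cutoff):
--     '''
--         function finds the boundaries of the whole disorder region
--         INPUT: list of 'D' or '-'
--                cutoff. Number of resudues that have to be "D" to define the region as disordered
--         OUTPUT: list or tuples, each tuple=(A,B), where A and B are the start and end of the disorder region
--     '''
--     flag = False
--     results = []
--
--     for i in range(len(dis)):
--
--         if dis[i:i+30].count('D') >=cutoff: # enough disordered
--             if not flag:
--                 tmp = [i,i+30]
--                 flag=True
--             elif flag: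
--                 tmp[1] = i+30
--
--         elif dis[i:i+30].count('D') <cutoff:
--             if flag:
--                 results.append(tmp)
--                 flag=False
--                 del tmp
--
--         if i==len(dis)-1 and flag:
--             results.append(tmp)
--
--     return results
-- ===== SOURCE B (Python) =====
-- def find_disorder_regions(dis, cutoff):
--     n = len(dis)
--     results = []
--     cnt = dis[:30].count('D')
--     start = None
--     for i in range(n):
--         if cnt >= cutoff:
--             if start is None:
--                 start = i
--         elif start is not None:
--             results.append([start, i + 29])
--             start = None
--         cnt -= dis[i] == 'D'
--         if i + 30 < n:
--             cnt += dis[i + 30] == 'D'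
--     if start is not None:
--         results.append([start, n + 29])
--     return results
-- ===== Notes on version B (the rewrite author's own statement) =====
-- stated objective: faster
-- what changed: B maintains the 30-window 'D'-count incrementally (one subtract/add per index) and tracks only the region start, appending the closed region's end computed from the index, instead of A's per-index recount of the whole 30-element slice and mutable [start,end] pair.
import Mathlib
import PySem

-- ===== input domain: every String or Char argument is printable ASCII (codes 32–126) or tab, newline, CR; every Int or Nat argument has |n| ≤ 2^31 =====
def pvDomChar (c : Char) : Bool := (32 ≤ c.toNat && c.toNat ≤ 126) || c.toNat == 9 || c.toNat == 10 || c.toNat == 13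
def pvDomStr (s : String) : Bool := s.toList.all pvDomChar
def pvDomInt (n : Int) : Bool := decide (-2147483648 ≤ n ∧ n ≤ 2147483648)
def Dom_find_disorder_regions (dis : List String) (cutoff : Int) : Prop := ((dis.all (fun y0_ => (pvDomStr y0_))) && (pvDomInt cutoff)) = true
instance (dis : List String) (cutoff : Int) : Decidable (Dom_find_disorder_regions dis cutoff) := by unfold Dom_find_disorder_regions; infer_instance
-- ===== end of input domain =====

-- B replaces A's per-index recount of the 30-window with an incrementally maintained
-- running 'D'-count (one update per step instead of a 30-element scan); same output.

-- ===== PORT A =====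
-- A's loop state: (results, tmp) where tmp = none models 'flag = False' / deleted tmp.
def pvStepA (dis : List String) (cutoff : Int) (n : Int)
    (st : List (List Int) × Option (Int × Int)) (i : Int) : List (List Int) × Option (Int × Int) :=
  let c : Int := ((PySem.List.slice dis (some i) (some (i + 30))).count "D" : Int)
  let st1 :=
    if cutoff ≤ c then           -- dis[i:i+30].count('D') >= cutoff
      match st.2 with
      | none => (st.1, some (i, i + 30))
      | some t => (st.1, some (t.1, i + 30))
    else                          -- dis[i:i+30].count('D') < cutoff
      match st.2 with
      | some t => (st.1 ++ [[t.1, t.2]], (none : Option (Int × Int)))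
      | none => st
  if i = n - 1 then               -- 'if i == len(dis)-1 and flag'
    match st1.2 with
    | some t => (st1.1 ++ [[t.1, t.2]], st1.2)
    | none => st1
  else st1

def find_disorder_regions (dis : List String) (cutoff : Int) : List (List Int) :=
  ((PySem.List.pyRange 0 (dis.length : Int) 1).foldl
      (pvStepA dis cutoff (dis.length : Int)) ([], none)).1

-- ===== PORT B =====
-- B's loop state: (cnt, start, results); cnt is the running count of 'D' in dis[i:i+30].
def pvStepB (dis : List String) (cutoff : Int) (n : Int)
    (st : Int × Option Int × List (List Int)) (i : Int) : Int × Option Int × List (List Int) :=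
  let p :=
    if cutoff ≤ st.1 then
      (if st.2.1.isNone then some i else st.2.1, st.2.2)
    else
      match st.2.1 with
      | some s => ((none : Option Int), st.2.2 ++ [[s, i + 29]])
      | none => (st.2.1, st.2.2)
  let cnt := st.1 - (if PySem.List.pyGetD dis i "" = "D" then 1 else 0)
  let cnt := if i + 30 < n then cnt + (if PySem.List.pyGetD dis (i + 30) "" = "D" then 1 else 0) else cnt
  (cnt, p.1, p.2)

def find_disorder_regions_alt (dis : List String) (cutoff : Int) : List (List Int) :=
  let n : Int := dis.length
  let st := (PySem.List.pyRange 0 n 1).foldl (pvStepB dis cutoff n)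
      (((PySem.List.slice dis none (some 30)).count "D" : Int), none, [])
  match st.2.1 with
  | some s => st.2.2 ++ [[s, n + 29]]
  | none => st.2.2

-- ===== PRECONDITION & SPEC =====
def Spec_find_disorder_regions (dis : List String) (cutoff : Int) (out : List (List Int)) : Prop := out = find_disorder_regions_alt dis cutoff
instance (dis : List String) (cutoff : Int) (out : List (List Int)) : Decidable (Spec_find_disorder_regions dis cutoff out) := by unfold Spec_find_disorder_regions; infer_instance

-- ===== CLAIM (what is proved, stated in full; the proofs are below) =====
def Claim_equal_find_disorder_regions : Prop := ∀ (dis : List String) (cutoff : Int), Dom_find_disorder_regions dis cutoff → Spec_find_disorder_regions dis cutoff (find_disorder_regions dis cutoff)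

-- ===== LEMMAS AND PROOFS =====

-- running 'D'-count of the window starting at j (proof-only helper)
def pvCnt (dis : List String) (j : Nat) : Int := (((dis.drop j).take 30).count "D" : Int)

-- B's run from loop head j onward, including the post-loop append (proof-only helper)
def pvRunB (dis : List String) (cutoff : Int) (j : Nat) (cnt : Int) (s : Option Int)
    (R : List (List Int)) : List (List Int) :=
  let st := (PySem.List.pyRange (j : Int) (dis.length : Int) 1).foldl
      (pvStepB dis cutoff (dis.length : Int)) (cnt, s, R)
  match st.2.1 with
  | some x => st.2.2 ++ [[x, (dis.length : Int) + 29]]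
  | none => st.2.2

-- A's window slice is the 30-element window at j
lemma pv_sliceA (dis : List String) (j : Nat) :
    PySem.List.slice dis (some (j : Int)) (some ((j : Int) + 30)) = (dis.drop j).take 30 := by
  have := PySem.List.slice_natCast dis j (j + 30)
  push_cast at this
  simpa using this

-- sliding-window identity: the next window count in terms of the current one
lemma pvCnt_succ (dis : List String) (j : Nat) (h : j < dis.length) :
    pvCnt dis (j + 1) =
      (if (j : Int) + 30 < (dis.length : Int) then
        (pvCnt dis j - (if dis.getD j "" = "D" then 1 else 0)) +
          (if dis.getD (j + 30) "" = "D" then 1 else 0)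
      else pvCnt dis j - (if dis.getD j "" = "D" then 1 else 0)) := by
  have hd := List.drop_eq_getElem_cons h
  have e1 : pvCnt dis j
      = (if dis.getD j "" = "D" then 1 else 0) + (((dis.drop (j+1)).take 29).count "D" : Int) := by
    unfold pvCnt
    rw [hd, show (30:Nat) = 29+1 from rfl, List.take_succ_cons, List.count_cons,
        List.getD_eq_getElem dis "" h]
    by_cases hD : dis[j] = "D" <;> simp [hD] <;> ring
  have hgd : (dis.drop (j+1))[29]? = dis[j+30]? := by
    rw [List.getElem?_drop, show j+1+29 = j+30 from by omega]
  have e2 : pvCnt dis (j+1)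
      = (((dis.drop (j+1)).take 29).count "D" : Int)
        + (if hx : j + 30 < dis.length then (if dis[j+30] = "D" then 1 else 0) else 0) := by
    unfold pvCnt
    rw [show (30:Nat) = 29+1 from rfl, List.take_add_one, hgd]
    by_cases hx : j + 30 < dis.length
    · rw [List.getElem?_eq_getElem hx, dif_pos hx]
      by_cases hD : dis[j+30] = "D" <;> simp [List.count_append, hD] <;> ring
    · rw [List.getElem?_eq_none (by omega), dif_neg hx]
      simp
  have hcast : ((j : Int) + 30 < (dis.length : Int)) ↔ j + 30 < dis.length := by
    constructor <;> intro <;> omega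
  by_cases hx : j + 30 < dis.length
  · rw [if_pos (hcast.mpr hx), e2, e1, dif_pos hx,
        @List.getD_eq_getElem _ dis "" (j+30) (by omega)]
    ring
  · rw [if_neg (fun hc => hx (hcast.mp hc)), e2, e1, dif_neg hx]
    ring

-- cnt component of B's step at a valid index is the next window count
lemma pv_stepB_cnt (dis : List String) (cutoff : Int) (j : Nat) (h : j < dis.length)
    (s : Option Int) (R : List (List Int)) :
    (pvStepB dis cutoff (dis.length : Int) (pvCnt dis j, s, R) ((j : Int))).1 = pvCnt dis (j + 1) := by
  rw [pvCnt_succ dis j h]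
  simp only [pvStepB, PySem.List.pyGetD_natCast,
    show (j : Int) + 30 = ((j + 30 : Nat) : Int) by push_cast; ring]

lemma pv_main (dis : List String) (cutoff : Int) :
    ∀ k j, j + k = dis.length → 1 ≤ k → ∀ (R : List (List Int)) (s : Option Int),
      ((PySem.List.pyRange (j : Int) (dis.length : Int) 1).foldl
          (pvStepA dis cutoff (dis.length : Int))
          (R, s.map (fun x => (x, (j : Int) + 29)))).1
        = pvRunB dis cutoff j (pvCnt dis j) s R := by
  intro k
  induction k with
  | zero => intro j hjk h1; omega
  | succ k ih =>
    intro j hjk _ R s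
    have hjn : j < dis.length := by omega
    have hlt : (j : Int) < (dis.length : Int) := by exact_mod_cast hjn
    have hc : ((PySem.List.slice dis (some (j:Int)) (some ((j:Int) + 30))).count "D" : Int)
        = pvCnt dis j := by rw [pv_sliceA]; rfl
    have hcntB := pv_stepB_cnt dis cutoff j hjn s R
    rw [PySem.List.pyRange_one_cons hlt]
    unfold pvRunB
    rw [PySem.List.pyRange_one_cons hlt]
    simp only [List.foldl_cons]
    by_cases hk0 : k = 0
    · -- last iteration: j = dis.length - 1
      subst hk0
      have hj1 : (dis.length : Int) = (j : Int) + 1 := by omega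
      have hnil : PySem.List.pyRange ((j:Int)+1) (dis.length : Int) = [] :=
        PySem.List.pyRange_one_eq_nil (by omega)
      rw [hnil]
      simp only [List.foldl_nil]
      have hlast : (j : Int) = (dis.length : Int) - 1 := by omega
      have hEnd : (dis.length : Int) + 29 = (j : Int) + 30 := by omega
      by_cases hgood : cutoff ≤ pvCnt dis j
      · cases s with
        | none =>
          simp [pvStepA, pvStepB, hc, hgood, if_pos hlast, hEnd]
        | some x =>
          simp [pvStepA, pvStepB, hc, hgood, if_pos hlast, hEnd]
      · cases s with
        | none =>
          simp [pvStepA, pvStepB, hc, hgood]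
        | some x =>
          simp [pvStepA, pvStepB, hc, hgood]
    · -- not the last iteration
      have hne : (j : Int) ≠ (dis.length : Int) - 1 := by omega
      have hcast1 : ((j + 1 : Nat) : Int) = (j : Int) + 1 := by push_cast; ring
      by_cases hgood : cutoff ≤ pvCnt dis j
      · cases s with
        | none =>
          have := ih (j + 1) (by omega) (by omega) R (some (j : Int))
          rw [hcast1] at this
          unfold pvRunB at this
          rw [hcast1] at this
          rw [show (pvStepA dis cutoff (dis.length : Int) (R, Option.map (fun x => (x, (j:Int)+29)) none) (j:Int))
              = (R, some ((j:Int), (j:Int)+1+29)) by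
            simp [pvStepA, hc, hgood, hne]; ring,
            show (pvStepB dis cutoff (dis.length : Int) (pvCnt dis j, none, R) (j:Int))
              = (pvCnt dis (j+1), some (j:Int), R) by
            refine Prod.ext hcntB ?_
            simp [pvStepB, hgood]]
          exact this
        | some x =>
          have := ih (j + 1) (by omega) (by omega) R (some x)
          rw [hcast1] at this
          unfold pvRunB at this
          rw [hcast1] at this
          rw [show (pvStepA dis cutoff (dis.length : Int) (R, Option.map (fun y => (y, (j:Int)+29)) (some x)) (j:Int))
              = (R, some (x, (j:Int)+1+29)) by
            simp [pvStepA, hc, hgood, hne]; ring,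
            show (pvStepB dis cutoff (dis.length : Int) (pvCnt dis j, some x, R) (j:Int))
              = (pvCnt dis (j+1), some x, R) by
            refine Prod.ext hcntB ?_
            simp [pvStepB, hgood]]
          exact this
      · cases s with
        | none =>
          have := ih (j + 1) (by omega) (by omega) R none
          rw [hcast1] at this
          unfold pvRunB at this
          rw [hcast1] at this
          rw [show (pvStepA dis cutoff (dis.length : Int) (R, Option.map (fun y => (y, (j:Int)+29)) none) (j:Int))
              = (R, none) by simp [pvStepA, hc, hgood, hne],
            show (pvStepB dis cutoff (dis.length : Int) (pvCnt dis j, none, R) (j:Int))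
              = (pvCnt dis (j+1), none, R) by
            refine Prod.ext hcntB ?_
            simp [pvStepB, hgood]]
          exact this
        | some x =>
          have := ih (j + 1) (by omega) (by omega) (R ++ [[x, (j:Int)+29]]) none
          rw [hcast1] at this
          unfold pvRunB at this
          rw [hcast1] at this
          rw [show (pvStepA dis cutoff (dis.length : Int) (R, Option.map (fun y => (y, (j:Int)+29)) (some x)) (j:Int))
              = (R ++ [[x, (j:Int)+29]], none) by simp [pvStepA, hc, hgood, hne],
            show (pvStepB dis cutoff (dis.length : Int) (pvCnt dis j, some x, R) (j:Int))
              = (pvCnt dis (j+1), none, R ++ [[x, (j:Int)+29]]) by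
            refine Prod.ext hcntB ?_
            simp [pvStepB, hgood]]
          exact this

-- ===== VERDICT (by name: the statement is the Claim_ definition above) =====
theorem find_disorder_regions_spec : Claim_equal_find_disorder_regions := by
  intro dis cutoff _
  unfold Spec_find_disorder_regions find_disorder_regions find_disorder_regions_alt
  cases hn : dis.length with
  | zero =>
      simp [PySem.List.pyRange_one_eq_nil]
  | succ m =>
      have := pv_main dis cutoff (m + 1) 0 (by omega) (by omega) [] none
      simp only [Nat.cast_zero, Option.map_none] at this
      rw [hn] at this
      rw [this]
      unfold pvRunB
      rw [hn]
      rw [PySem.List.slice_to dis (show (0:Int) ≤ 30 by norm_num)]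
      simp [pvCnt]
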